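-- pv_equiv track=rewrite | github.com/yeseongcho/- | ICT 문제해결기법/PA2/PAsix.py | getting
-- ===== SOURCE A (Python) =====
-- def getting(locate_list, people_list, distance) :
--     index = len(people_list)-1
--     Max = 0
--     for j in range(index, 0, -1) :
--         cum = people_list[j]
--         m = j-1
--         while(locate_list[j] - distance <= locate_list[m]+distance) :
--             cum = cum + people_list[m]
--             #if cum > Max :
--                 #Max = cum
--             m = m - 1
--             if m == -1 :
--                 break
--         if cum > Max :
--                 Max = cum
--
--     return Max
-- ===== SOURCE B (Python) =====
-- def getting(locate_list, people_list, distance):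
--     n = len(people_list)
--     prefix = [0]
--     for p in people_list:
--         prefix.append(prefix[-1] + p)
--     best = 0
--     for j in range(1, n):
--         m = j - 1
--         while m >= 0 and locate_list[j] - locate_list[m] <= 2 * distance:
--             m -= 1
--         window = prefix[j + 1] - prefix[m + 1]
--         if window > best:
--             best = window
--     return best
-- ===== Notes on version B (the rewrite author's own statement) =====
-- stated objective: alternative
-- what changed: B builds a prefix-sum list once and loops forward over j, its inner scan only locating the break index, with each window sum read off the prefix array instead of accumulated element by element as in A's backward loop.
import Mathlib
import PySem

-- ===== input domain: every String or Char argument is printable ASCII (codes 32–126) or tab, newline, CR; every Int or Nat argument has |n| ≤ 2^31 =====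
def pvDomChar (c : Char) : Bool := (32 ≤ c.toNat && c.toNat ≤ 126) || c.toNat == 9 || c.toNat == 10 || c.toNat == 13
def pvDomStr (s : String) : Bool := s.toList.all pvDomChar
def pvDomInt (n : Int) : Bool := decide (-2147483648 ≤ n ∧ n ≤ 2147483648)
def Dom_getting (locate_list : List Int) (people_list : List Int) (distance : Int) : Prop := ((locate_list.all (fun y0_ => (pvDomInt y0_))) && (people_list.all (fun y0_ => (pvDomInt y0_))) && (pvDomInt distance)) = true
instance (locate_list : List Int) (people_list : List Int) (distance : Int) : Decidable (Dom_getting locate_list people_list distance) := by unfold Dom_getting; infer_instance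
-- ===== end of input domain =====

-- B replaces A's inner accumulation with a prefix-sum list built once plus an inner scan that
-- only locates the break index, looping forward (objective: alternative decomposition, same cost).

-- ===== PORT A =====
-- inner while loop of A: check the condition, add people_list[m], decrement m, break at m = -1.
-- fuel = j.toNat suffices: m starts at j-1 and decreases each iteration, stopping at -1.
def gettingInner (locate_list people_list : List Int) (distance j : Int) :
    Nat → Int → Int → Int
  | 0, _, cum => cum
  | fuel + 1, m, cum =>
    if PySem.List.pyGetD locate_list j 0 - distance ≤ PySem.List.pyGetD locate_list m 0 + distance then
      let cum' := cum + PySem.List.pyGetD people_list m 0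
      let m' := m - 1
      if m' = -1 then cum' else gettingInner locate_list people_list distance j fuel m' cum'
    else cum

def getting (locate_list : List Int) (people_list : List Int) (distance : Int) : Int :=
  let index : Int := (people_list.length : Int) - 1
  (PySem.List.pyRange index 0 (-1)).foldl
    (fun Max j =>
      let cum := gettingInner locate_list people_list distance j j.toNat (j - 1)
        (PySem.List.pyGetD people_list j 0)
      if cum > Max then cum else Max) 0

-- ===== PORT B =====
-- inner while loop of B: only move m left while the window condition holds.
-- fuel = j.toNat + 1 suffices: m starts at j-1 and the check runs at most j+1 times.
def gettingAltStop (locate_list : List Int) (distance j : Int) : Nat → Int → Int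
  | 0, m => m
  | fuel + 1, m =>
    if m ≥ 0 ∧ PySem.List.pyGetD locate_list j 0 - PySem.List.pyGetD locate_list m 0 ≤ 2 * distance then
      gettingAltStop locate_list distance j fuel (m - 1)
    else m

def getting_alt (locate_list : List Int) (people_list : List Int) (distance : Int) : Int :=
  let n : Int := (people_list.length : Int)
  let prefx := people_list.foldl (fun pr p => pr ++ [PySem.List.pyGetD pr (-1) 0 + p]) [0]
  (PySem.List.pyRange 1 n 1).foldl
    (fun best j =>
      let m := gettingAltStop locate_list distance j (j.toNat + 1) (j - 1)
      let window := PySem.List.pyGetD prefx (j + 1) 0 - PySem.List.pyGetD prefx (m + 1) 0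
      if window > best then window else best) 0

-- ===== PRECONDITION & SPEC =====
-- Pre_ excludes exactly the inputs on which Python A raises IndexError: len(people_list) ≥ 2
-- with locate_list shorter than people_list (the loop reads locate_list[j] for j up to len(people_list)-1).
def Pre_getting (locate_list : List Int) (people_list : List Int) (distance : Int) : Prop :=
  people_list.length ≤ 1 ∨ people_list.length ≤ locate_list.length

instance (locate_list : List Int) (people_list : List Int) (distance : Int) : Decidable (Pre_getting locate_list people_list distance) := by unfold Pre_getting; infer_instance

def pvWitness_getting : List Int × List Int × Int := ([0, 1, 5, 6], [3, 2, 4, 1], 1)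

def Spec_getting (locate_list : List Int) (people_list : List Int) (distance : Int) (out : Int) : Prop := out = getting_alt locate_list people_list distance
instance (locate_list : List Int) (people_list : List Int) (distance : Int) (out : Int) : Decidable (Spec_getting locate_list people_list distance out) := by unfold Spec_getting; infer_instance

-- ===== CLAIM (what is proved, stated in full; the proofs are below) =====
def Claim_equal_getting : Prop := ∀ (locate_list : List Int) (people_list : List Int) (distance : Int), Dom_getting locate_list people_list distance → Pre_getting locate_list people_list distance → Spec_getting locate_list people_list distance (getting locate_list people_list distance)

-- ===== LEMMAS AND PROOFS =====

-- partial sum of the first k.toNat people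
def pvS (people_list : List Int) (k : Int) : Int := (people_list.take k.toNat).sum

theorem pvS_succ (xs : List Int) (m : Int) (h0 : 0 ≤ m) (h : m < (xs.length : Int)) :
    pvS xs (m + 1) = pvS xs m + PySem.List.pyGetD xs m 0 := by
  have hm : m.toNat < xs.length := by omega
  have ht : (m + 1).toNat = m.toNat + 1 := by omega
  rw [pvS, pvS, ht, PySem.List.pyGetD_eq_getElem xs 0 h0 h, List.sum_take_succ xs m.toNat hm]

-- the prefix list built by B's first loop is the list of partial sums
theorem pv_build_prefix (xs pre : List Int) (hne : pre ≠ []) :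
    xs.foldl (fun pr p => pr ++ [PySem.List.pyGetD pr (-1) 0 + p]) pre
      = pre ++ (List.range xs.length).map (fun k => pre.getLastD 0 + (xs.take (k + 1)).sum) := by
  induction xs generalizing pre with
  | nil => simp
  | cons x xs ih =>
    have hg : PySem.List.pyGetD pre (-1) 0 = pre.getLastD 0 := by
      rw [PySem.List.pyGetD_neg_one pre 0 hne, List.getLastD_eq_getLast?,
        List.getLast?_eq_some_getLast hne, Option.getD_some]
    have hne' : pre ++ [pre.getLastD 0 + x] ≠ [] := by simp
    rw [List.foldl_cons, hg, ih _ hne']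
    have hlast : (pre ++ [pre.getLastD 0 + x]).getLastD 0 = pre.getLastD 0 + x := by
      simp
    rw [hlast]
    simp [List.range_succ_eq_map, List.map_map, List.append_assoc, Function.comp_def, add_assoc]

-- reading the prefix list at an in-range index gives pvS
theorem pv_prefix_get (P : List Int) (t : Int) (h0 : 0 ≤ t) (h1 : t ≤ (P.length : Int)) :
    PySem.List.pyGetD ([0] ++ (List.range P.length).map (fun k => (P.take (k + 1)).sum)) t 0
      = pvS P t := by
  have hlen : (([0] ++ (List.range P.length).map (fun k => (P.take (k + 1)).sum)) : List Int).length = P.length + 1 := by simp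
  have ht : t = ((t.toNat : Nat) : Int) := by omega
  rw [ht, PySem.List.pyGetD_natCast]
  cases h : t.toNat with
  | zero => simp [pvS]
  | succ s =>
    have hs : s < P.length := by omega
    simp only [List.singleton_append, List.getD_cons_succ]
    rw [List.getD_eq_getElem?_getD, List.getElem?_map, List.getElem?_range hs]
    simp [pvS]

-- bounds of B's stop index
theorem pv_stop_bounds (locate_list : List Int) (distance j : Int) :
    ∀ (fuel : Nat) (m : Int), -1 ≤ m →
    -1 ≤ gettingAltStop locate_list distance j fuel m ∧
      gettingAltStop locate_list distance j fuel m ≤ m := by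
  intro fuel
  induction fuel with
  | zero => intro m hm; simp [gettingAltStop, hm]
  | succ f ih =>
    intro m hm
    rw [gettingAltStop]
    split_ifs with h
    · have := ih (m - 1) (by omega)
      omega
    · omega

-- A's inner loop computes a prefix-sum difference against B's stop index
theorem pv_inner_eq (locate_list people_list : List Int) (distance j : Int) :
    ∀ (k : Nat) (m cum : Int), m.toNat = k → 0 ≤ m → m < (people_list.length : Int) →
      gettingInner locate_list people_list distance j (m.toNat + 1) m cum
        = cum + pvS people_list (m + 1)
            - pvS people_list (gettingAltStop locate_list distance j (m.toNat + 2) m + 1) := by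
  intro k
  induction k with
  | zero =>
    intro m cum hk hm0 hmn
    have hm : m = 0 := by omega
    subst hm
    by_cases hc : PySem.List.pyGetD locate_list j 0 - distance ≤ PySem.List.pyGetD locate_list 0 0 + distance
    · have hc' : (0:Int) ≥ 0 ∧ PySem.List.pyGetD locate_list j 0 - PySem.List.pyGetD locate_list 0 0 ≤ 2 * distance := ⟨le_refl 0, by omega⟩
      simp only [Int.toNat_zero, gettingInner, gettingAltStop, if_pos hc, if_pos hc']
      have hstep := pvS_succ people_list 0 (by omega) hmn
      simp only [show (0 : Int) - 1 = -1 by ring,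
        if_neg
          (show
            ¬((-1 : Int) ≥ 0 ∧
                PySem.List.pyGetD locate_list j 0 - PySem.List.pyGetD locate_list (-1) 0 ≤
                  2 * distance)
            by omega)]
      simp [pvS] at hstep ⊢
      omega
    · have hc' : ¬((0:Int) ≥ 0 ∧ PySem.List.pyGetD locate_list j 0 - PySem.List.pyGetD locate_list 0 0 ≤ 2 * distance) := by omega
      simp only [Int.toNat_zero, gettingInner, gettingAltStop, if_neg hc, if_neg hc']
      ring
  | succ f ih =>
    intro m cum hk hm0 hmn
    have hm1 : 1 ≤ m := by omega
    by_cases hc : PySem.List.pyGetD locate_list j 0 - distance ≤ PySem.List.pyGetD locate_list m 0 + distance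
    · have hc' : m ≥ 0 ∧ PySem.List.pyGetD locate_list j 0 - PySem.List.pyGetD locate_list m 0 ≤ 2 * distance := ⟨by omega, by omega⟩
      rw [hk]
      rw [show f + 1 + 1 = f + 1 + 1 from rfl, gettingInner, if_pos hc]
      rw [show f + 1 + 2 = (f + 2) + 1 from rfl, gettingAltStop, if_pos hc']
      have hne : ¬(m - 1 = -1) := by omega
      simp only [if_neg hne]
      have hk' : (m - 1).toNat = f := by omega
      have hrec := ih (m - 1) (cum + PySem.List.pyGetD people_list m 0) hk' (by omega) (by omega)
      have hf1 : (m - 1).toNat + 1 = f + 1 := by omega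
      have hf2 : (m - 1).toNat + 2 = f + 2 := by omega
      rw [hf1, hf2] at hrec
      rw [hrec]
      have hstep := pvS_succ people_list m hm0 hmn
      have hmm : m - 1 + 1 = m := by ring
      rw [hmm]
      omega
    · have hc' : ¬(m ≥ 0 ∧ PySem.List.pyGetD locate_list j 0 - PySem.List.pyGetD locate_list m 0 ≤ 2 * distance) := by omega
      simp only [gettingInner, gettingAltStop, if_neg hc, if_neg hc']
      ring

-- folding 'keep the larger' over a reversed list gives the same result
theorem pv_foldl_max_rev (f : Int → Int) (l : List Int) (init : Int) :
    l.reverse.foldl (fun M j => if f j > M then f j else M) init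
      = l.foldl (fun M j => if f j > M then f j else M) init := by
  induction l generalizing init with
  | nil => rfl
  | cons x l ih =>
    simp only [List.reverse_cons, List.foldl_append, List.foldl_cons, List.foldl_nil, ih]
    have key : ∀ (m : List Int) (a : Int),
        m.foldl (fun M j => if f j > M then f j else M) (if f x > a then f x else a)
          = (fun r => if f x > r then f x else r) (m.foldl (fun M j => if f j > M then f j else M) a) := by
      intro m
      induction m with
      | nil => intro a; rfl
      | cons y m ihm =>
        intro a
        simp only [List.foldl_cons]
        rw [show (if f y > if f x > a then f x else a then f y else if f x > a then f x else a)
              = (if f x > if f y > a then f y else a then f x else if f y > a then f y else a) by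
            split_ifs <;> omega]
        exact ihm _
    rw [key]

-- the value A's body computes for one j equals the value B's body computes for the same j
theorem pv_body_eq (L P : List Int) (d j : Int) (h1 : 1 ≤ j) (h2 : j < (P.length : Int)) :
    gettingInner L P d j j.toNat (j - 1) (PySem.List.pyGetD P j 0)
      = PySem.List.pyGetD ([0] ++ (List.range P.length).map (fun k => (P.take (k + 1)).sum)) (j + 1) 0
        - PySem.List.pyGetD ([0] ++ (List.range P.length).map (fun k => (P.take (k + 1)).sum))
            (gettingAltStop L d j (j.toNat + 1) (j - 1) + 1) 0 := by
  have hjt : j.toNat = (j - 1).toNat + 1 := by omega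
  rw [hjt]
  rw [pv_inner_eq L P d j (j - 1).toNat (j - 1) _ rfl (by omega) (by omega)]
  have hsb := pv_stop_bounds L d j ((j - 1).toNat + 2) (j - 1) (by omega)
  rw [pv_prefix_get P (j + 1) (by omega) (by omega),
    pv_prefix_get P (gettingAltStop L d j ((j - 1).toNat + 2) (j - 1) + 1) (by omega) (by omega)]
  have hstep := pvS_succ P j (by omega) h2
  have hmm : j - 1 + 1 = j := by ring
  rw [hmm]
  omega

-- the two programs compute the same value on every input
theorem pv_main (L P : List Int) (d : Int) : getting L P d = getting_alt L P d := by
  rw [getting, getting_alt]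
  simp only []
  rw [pv_build_prefix P [0] (by simp)]
  simp only [show ([0] : List Int).getLastD 0 = 0 from rfl, zero_add, List.singleton_append]
  rw [show PySem.List.pyRange ((P.length : Int) - 1) 0 (-1)
        = (PySem.List.pyRange 1 (P.length : Int) 1).reverse by
      rw [PySem.List.pyRange_neg_one_eq_reverse]
      norm_num]
  rw [pv_foldl_max_rev (fun j => gettingInner L P d j j.toNat (j - 1) (PySem.List.pyGetD P j 0))]
  refine List.foldl_ext _ _ 0 ?_
  intro M j hj
  have hmem := (PySem.List.mem_pyRange_one).mp hj
  have hbody := pv_body_eq L P d j hmem.1 hmem.2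
  simp only [List.singleton_append] at hbody
  rw [hbody]

-- ===== VERDICT (by name: the statement is the Claim_ definition above) =====
theorem getting_spec : Claim_equal_getting := by
  intro L P d _ _
  unfold Spec_getting
  exact pv_main L P d
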